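-- pv_equiv track=rewrite | github.com/romgille/IN3I18 | tp2/file.py | storeWords
-- ===== SOURCE A (Python) =====
-- def storeWords(file):
--     dic = {}
--     for word in file.split():
--         if(word.isdigit()):
--             continue
--         if word in dic.keys():
--             dic[word] += 1
--         else:
--             dic[word] = 1
--     return dic
-- ===== SOURCE B (Python) =====
-- def storeWords(file):
--     words = [w for w in file.split() if not w.isdigit()]
--     return {w: words.count(w) for w in dict.fromkeys(words)}
-- ===== Notes on version B (the rewrite author's own statement) =====
-- stated objective: alternative
-- what changed: Replaces the incremental membership-test-and-increment dict loop with a filter of non-digit tokens, an ordered dedup, and a dict comprehension pairing each distinct word with its count in the token list.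
import Mathlib
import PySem

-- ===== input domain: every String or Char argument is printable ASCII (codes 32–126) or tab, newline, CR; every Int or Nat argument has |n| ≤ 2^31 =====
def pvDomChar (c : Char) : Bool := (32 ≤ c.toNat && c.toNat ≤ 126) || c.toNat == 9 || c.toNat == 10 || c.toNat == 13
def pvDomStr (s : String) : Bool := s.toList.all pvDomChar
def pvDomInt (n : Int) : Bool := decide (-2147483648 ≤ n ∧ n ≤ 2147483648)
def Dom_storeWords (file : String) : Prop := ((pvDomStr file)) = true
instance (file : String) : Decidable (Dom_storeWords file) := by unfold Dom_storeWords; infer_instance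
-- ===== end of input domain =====

-- B replaces A's incremental membership/increment dict loop by filter + ordered dedup + per-word count (alternative decomposition, not faster).

-- ===== PORT A =====
def storeWords (file : String) : List (String × Int) :=
  ((PySem.Str.split₀ file).foldl (fun dic word =>
      if PySem.Str.strIsdigit word then dic
      else if dic.contains word then dic.insert word (dic.getD word 0 + 1)
      else dic.insert word 1)
    PySem.Dict.empty).items

-- ===== PORT B =====
def storeWords_alt (file : String) : List (String × Int) :=
  let words := (PySem.Str.split₀ file).filter (fun w => !PySem.Str.strIsdigit w)
  (PySem.List.dedup words).map (fun w => (w, (words.count w : Int)))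

-- ===== PRECONDITION & SPEC =====
def Spec_storeWords (file : String) (out : List (String × Int)) : Prop := out = storeWords_alt file
instance (file : String) (out : List (String × Int)) : Decidable (Spec_storeWords file out) := by unfold Spec_storeWords; infer_instance

-- ===== CLAIM (what is proved, stated in full; the proofs are below) =====
def Claim_equal_storeWords : Prop := ∀ (file : String), Dom_storeWords file → Spec_storeWords file (storeWords file)

-- ===== LEMMAS AND PROOFS =====

-- A's loop body is exactly the counter step once the skipped digit tokens are filtered out.
theorem storeWords_fold_eq_counter (ws : List String) (d : PySem.Dict String Int) :
    ws.foldl (fun dic word =>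
      if PySem.Str.strIsdigit word then dic
      else if dic.contains word then dic.insert word (dic.getD word 0 + 1)
      else dic.insert word 1) d
    = (ws.filter (fun w => !PySem.Str.strIsdigit w)).foldl
        (fun dic word => dic.insert word (dic.getD word 0 + 1)) d := by
  induction ws generalizing d with
  | nil => rfl
  | cons w ws ih =>
    simp only [List.foldl_cons, List.filter_cons]
    by_cases hd : PySem.Str.strIsdigit w = true
    · have hnot : (!PySem.Str.strIsdigit w) = false := by rw [hd]; rfl
      rw [if_pos hd, if_neg (by rw [hnot]; exact Bool.false_ne_true)]
      exact ih d
    · have hb : PySem.Str.strIsdigit w = false := eq_false_of_ne_true hd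
      have hpos : (!PySem.Str.strIsdigit w) = true := by rw [hb]; rfl
      rw [if_neg hd, if_pos hpos, List.foldl_cons]
      by_cases hc : d.contains w = true
      · rw [if_pos hc]
        exact ih _
      · rw [if_neg hc, PySem.Dict.getD_of_not_contains d 0 (eq_false_of_ne_true hc)]
        exact ih _

-- ===== VERDICT (by name: the statement is the Claim_ definition above) =====
theorem storeWords_spec : Claim_equal_storeWords := by
  intro file _
  unfold Spec_storeWords storeWords storeWords_alt
  rw [storeWords_fold_eq_counter, PySem.Dict.foldl_insert_getD_add_one_eq_counter, PySem.Dict.items_counter]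
  simp [PySem.List.dedup_eq_ofList]
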